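-- pv_equiv track=rewrite | github.com/NVS-PRABHASH/nlp_to_sql | Scripts/time_reference.py | _merge_aliases
-- ===== SOURCE A (Python) =====
-- from typing import Dict, Any
--
-- def _merge_aliases(defaults: Dict[str, list[str]], overrides: Dict[str, list[str]] | None) -> Dict[str, list[str]]:
--     """Merge default alias mapping with overrides (union, lowercase, dedup)."""
--     result: Dict[str, list[str]] = {}
--     overrides = overrides or {}
--     for key, def_list in defaults.items():
--         ovr_list = overrides.get(key, []) or []
--         # normalize and merge
--         merged = []
--         seen = set()
--         for token in [*(t.lower() for t in def_list), *(t.lower() for t in ovr_list)]: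
--             if token and token not in seen:
--                 seen.add(token)
--                 merged.append(token)
--         result[key] = merged
--     # Include any extra keys present only in overrides
--     for key, ovr_list in overrides.items():
--         if key not in result:
--             norm = []
--             seen = set()
--             for t in (ovr_list or []):
--                 t = t.lower()
--                 if t and t not in seen:
--                     seen.add(t)
--                     norm.append(t)
--             result[key] = norm
--     return result
-- ===== SOURCE B (Python) =====
-- def _norm(tokens, seen=frozenset()):
--     """Lowercase, drop falsy tokens, dedup keeping first occurrence (recursively)."""
--     if not tokens:
--         return []
--     t = tokens[0].lower()
--     if t and t not in seen:
--         return [t] + _norm(tokens[1:], seen | {t})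
--     return _norm(tokens[1:], seen)
--
--
-- def _merge_aliases(defaults, overrides):
--     """Merge default alias mapping with overrides (union, lowercase, dedup)."""
--     overrides = overrides or {}
--     keys = [*defaults, *(k for k in overrides if k not in defaults)]
--     return {k: _norm([*defaults.get(k, []), *(overrides.get(k) or [])]) for k in keys}
-- ===== Notes on version B (the rewrite author's own statement) =====
-- stated objective: simpler
-- what changed: A's two separate loops, each with its own inline lowercase/dedup block and a membership-guarded dict build, are replaced by one shared recursive normalisation helper and a single comprehension over the ordered union of keys (defaults keys, then override-only keys).
import Mathlib
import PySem

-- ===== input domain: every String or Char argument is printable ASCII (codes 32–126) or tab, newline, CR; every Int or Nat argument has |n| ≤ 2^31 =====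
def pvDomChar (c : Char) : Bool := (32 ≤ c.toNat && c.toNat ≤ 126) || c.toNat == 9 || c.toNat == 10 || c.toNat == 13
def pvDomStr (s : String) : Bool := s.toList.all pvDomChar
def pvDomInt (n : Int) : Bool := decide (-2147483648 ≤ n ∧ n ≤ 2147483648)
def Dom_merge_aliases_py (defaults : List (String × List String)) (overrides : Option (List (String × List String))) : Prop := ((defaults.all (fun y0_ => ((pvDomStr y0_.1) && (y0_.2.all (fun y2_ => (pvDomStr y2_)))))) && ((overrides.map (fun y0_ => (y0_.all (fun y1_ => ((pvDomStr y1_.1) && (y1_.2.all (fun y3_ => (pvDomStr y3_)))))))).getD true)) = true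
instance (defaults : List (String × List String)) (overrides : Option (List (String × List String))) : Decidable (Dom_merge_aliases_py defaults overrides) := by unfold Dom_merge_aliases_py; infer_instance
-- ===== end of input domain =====

-- B replaces A's two duplicated dedup passes by one comprehension over the ordered union
-- of keys with a single shared normalisation helper (objective: simpler).

-- ===== PORT A =====
-- the inner dedup loop body of A ('if token and token not in seen: seen.add; merged.append')
def pvStepA (st : List String × PySem.Set String) (token : String) : List String × PySem.Set String :=
  if token ≠ "" ∧ token ∉ st.2 then (st.1 ++ [token], st.2.add token) else st

def merge_aliases_py (defaults : List (String × List String)) (overrides : Option (List (String × List String))) : List (String × List String) :=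
  -- overrides = overrides or {}
  let ovr : List (String × List String) := overrides.getD []
  -- first loop: for key, def_list in defaults.items()
  let result : PySem.Dict String (List String) :=
    defaults.foldl (fun res p =>
      let ovr_list : List String := (List.lookup p.1 ovr).getD []
      let merged := (p.2.map PySem.Str.lower ++ ovr_list.map PySem.Str.lower).foldl pvStepA ([], PySem.Set.ofList [])
      res.insert p.1 merged.1) PySem.Dict.empty
  -- second loop: for key, ovr_list in overrides.items(): if key not in result
  let result :=
    ovr.foldl (fun res p =>
      if res.contains p.1 then res
      else
        let norm := p.2.foldl (fun st t => pvStepA st (PySem.Str.lower t)) ([], PySem.Set.ofList [])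
        res.insert p.1 norm.1) result
  result.items

-- ===== PORT B =====
-- _norm(tokens, seen): lowercase, drop falsy tokens, dedup keeping first occurrence (recursive)
def pvNorm (seen : PySem.Set String) : List String → List String
  | [] => []
  | t :: ts =>
    let x := PySem.Str.lower t
    if x ≠ "" ∧ x ∉ seen then x :: pvNorm (seen.add x) ts else pvNorm seen ts

def merge_aliases_py_alt (defaults : List (String × List String)) (overrides : Option (List (String × List String))) : List (String × List String) :=
  let ovr : List (String × List String) := overrides.getD []
  let dkeys : List String := defaults.map Prod.fst
  -- keys = [*defaults, *(k for k in overrides if k not in defaults)]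
  let keys : List String := dkeys ++ (ovr.map Prod.fst).filter (fun k => !(dkeys.contains k))
  keys.map (fun k =>
    (k, pvNorm (PySem.Set.ofList []) ((List.lookup k defaults).getD [] ++ (List.lookup k ovr).getD [])))

-- ===== PRECONDITION & SPEC =====
-- Pre_ excludes only association lists with a duplicate key: those do not represent any
-- Python dict (the Python function's arguments are dicts, whose keys are always unique),
-- so no input reaching the Python A is excluded.
def Pre_merge_aliases_py (defaults : List (String × List String)) (overrides : Option (List (String × List String))) : Prop :=
  (defaults.map Prod.fst).Nodup ∧ ((overrides.getD []).map Prod.fst).Nodup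
instance (defaults : List (String × List String)) (overrides : Option (List (String × List String))) : Decidable (Pre_merge_aliases_py defaults overrides) := by unfold Pre_merge_aliases_py; infer_instance

def pvWitness_merge_aliases_py : (List (String × List String)) × (Option (List (String × List String))) :=
  ([("day", ["Today", "TODAY", ""])], some [("day", ["toDay", "now"]), ("week", ["Wk"])])

def Spec_merge_aliases_py (defaults : List (String × List String)) (overrides : Option (List (String × List String))) (out : List (String × List String)) : Prop := out = merge_aliases_py_alt defaults overrides
instance (defaults : List (String × List String)) (overrides : Option (List (String × List String))) (out : List (String × List String)) : Decidable (Spec_merge_aliases_py defaults overrides out) := by unfold Spec_merge_aliases_py; infer_instance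

-- ===== CLAIM (what is proved, stated in full; the proofs are below) =====
def Claim_equal_merge_aliases_py : Prop := ∀ (defaults : List (String × List String)) (overrides : Option (List (String × List String))), Dom_merge_aliases_py defaults overrides → Pre_merge_aliases_py defaults overrides → Spec_merge_aliases_py defaults overrides (merge_aliases_py defaults overrides)

-- ===== LEMMAS AND PROOFS =====

-- proof-only abbreviations for the two normalisation loops of port A
def pvM (ovr : List (String × List String)) (p : String × List String) : List String :=
  ((p.2.map PySem.Str.lower ++ ((List.lookup p.1 ovr).getD []).map PySem.Str.lower).foldl
    pvStepA ([], PySem.Set.ofList [])).1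

def pvN (p : String × List String) : List String :=
  (p.2.foldl (fun st t => pvStepA st (PySem.Str.lower t)) ([], PySem.Set.ofList [])).1

-- A's inner dedup loop (lowering each token) computes pvNorm
theorem pv_foldA_eq_pvNorm (l : List String) (acc : List String) (seen : PySem.Set String) :
    (l.foldl (fun st t => pvStepA st (PySem.Str.lower t)) (acc, seen)).1 = acc ++ pvNorm seen l := by
  induction l generalizing acc seen with
  | nil => simp [pvNorm]
  | cons t ts ih =>
    rw [List.foldl_cons]
    by_cases h : PySem.Str.lower t ≠ "" ∧ PySem.Str.lower t ∉ seen
    · have hs : pvStepA (acc, seen) (PySem.Str.lower t)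
          = (acc ++ [PySem.Str.lower t], seen.add (PySem.Str.lower t)) := by
        simp only [pvStepA]; rw [if_pos h]
      rw [hs, ih]
      simp only [pvNorm]
      rw [if_pos h]
      simp
    · have hs : pvStepA (acc, seen) (PySem.Str.lower t) = (acc, seen) := by
        simp only [pvStepA]; rw [if_neg h]
      rw [hs, ih]
      simp only [pvNorm]
      rw [if_neg h]

-- with Nodup keys, first-match lookup returns the value stored with the key
theorem pv_lookup_of_mem {ν : Type} (l : List (String × ν)) (h : (l.map Prod.fst).Nodup)
    {k : String} {v : ν} (hm : (k, v) ∈ l) : List.lookup k l = some v := by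
  induction l with
  | nil => cases hm
  | cons p ps ih =>
    simp only [List.map_cons, List.nodup_cons] at h
    rcases List.mem_cons.mp hm with h1 | h1
    · cases h1; simp
    · have hk : k ≠ p.1 := by
        intro he; exact h.1 (he ▸ (List.mem_map.mpr ⟨(k, v), h1, rfl⟩))
      cases p with
      | mk a b =>
        simp only [List.lookup_cons]
        have : (k == a) = false := by simp_all
        simp [this, ih h.2 h1]

-- a key absent from the key list has lookup none
theorem pv_lookup_of_not_mem {ν : Type} (l : List (String × ν)) {k : String}
    (h : k ∉ l.map Prod.fst) : List.lookup k l = none := by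
  induction l with
  | nil => rfl
  | cons p ps ih =>
    simp only [List.map_cons, List.mem_cons, not_or] at h
    cases p with
    | mk a b =>
      have : (k == a) = false := by simpa using h.1
      simp [List.lookup_cons, this, ih h.2]

-- A's guarded second loop, over pairs with Nodup keys, appends the pairs of fresh keys
theorem pv_foldl_guard_items (g : String × List String → List String) :
    ∀ (l : List (String × List String)) (d : PySem.Dict String (List String)),
    (l.map Prod.fst).Nodup →
    (l.foldl (fun res p => if res.contains p.1 then res else res.insert p.1 (g p)) d).items
      = d.items ++ (l.filter (fun p => !(d.contains p.1))).map (fun p => (p.1, g p)) := by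
  intro l
  induction l with
  | nil => intro d _; simp
  | cons p ps ih =>
    intro d hnd
    simp only [List.map_cons, List.nodup_cons] at hnd
    rw [List.foldl_cons, List.filter_cons]
    by_cases hc : d.contains p.1 = true
    · rw [if_pos hc, if_neg (by simp [hc]), ih d hnd.2]
    · have hc' : d.contains p.1 = false := by simpa using hc
      rw [if_neg hc, if_pos (by simp [hc']), ih (d.insert p.1 (g p)) hnd.2]
      rw [PySem.Dict.items_insert_of_not_contains _ _ hc']
      have hfeq : ps.filter (fun q => !((d.insert p.1 (g p)).contains q.1))
          = ps.filter (fun q => !(d.contains q.1)) := by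
        apply List.filter_congr
        intro q hq
        have hne : q.1 ≠ p.1 := by
          intro he
          exact hnd.1 (he ▸ (List.mem_map.mpr ⟨q, hq, rfl⟩))
        rw [PySem.Dict.contains_insert]
        simp [hne]
      rw [hfeq]
      simp

-- the core identity, stated on the zeta-reduced bodies of the two ports
theorem pv_main (defaults ovr : List (String × List String))
    (hd : (defaults.map Prod.fst).Nodup) (ho : (ovr.map Prod.fst).Nodup) :
    (ovr.foldl (fun res p => if res.contains p.1 then res else res.insert p.1 (pvN p))
      (defaults.foldl (fun res p => res.insert p.1 (pvM ovr p)) PySem.Dict.empty)).items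
    = (defaults.map Prod.fst
        ++ (ovr.map Prod.fst).filter (fun k => !((defaults.map Prod.fst).contains k))).map
        (fun k => (k, pvNorm (PySem.Set.ofList [])
          ((List.lookup k defaults).getD [] ++ (List.lookup k ovr).getD []))) := by
  rw [pv_foldl_guard_items (fun p => pvN p) ovr _ ho]
  rw [PySem.Dict.items_foldl_insert_fresh defaults Prod.fst (fun p => pvM ovr p) PySem.Dict.empty
      (by intro a _; simp) hd]
  have hkeys : (defaults.foldl (fun res p => res.insert p.1 (pvM ovr p)) PySem.Dict.empty).keys
      = defaults.map Prod.fst := by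
    have h := PySem.Dict.items_foldl_insert_fresh defaults Prod.fst (fun p => pvM ovr p)
      PySem.Dict.empty (by intro a _; simp) hd
    simp only [PySem.Dict.keys, h]
    have hemp : (PySem.Dict.empty : PySem.Dict String (List String)).items = [] := rfl
    simp [hemp, Function.comp_def]
  have hcont : ∀ k : String,
      (defaults.foldl (fun res p => res.insert p.1 (pvM ovr p)) PySem.Dict.empty).contains k
      = (defaults.map Prod.fst).contains k := by
    intro k
    rw [PySem.Dict.contains_eq_decide_mem_keys, hkeys]
    simp
  have hemp : (PySem.Dict.empty : PySem.Dict String (List String)).items = [] := rfl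
  rw [hemp, List.nil_append, List.map_append]
  congr 1
  · -- defaults part
    rw [List.map_map]
    apply List.map_congr_left
    intro p hp
    have hlk : List.lookup p.1 defaults = some p.2 := pv_lookup_of_mem defaults hd hp
    have hfold := pv_foldA_eq_pvNorm (p.2 ++ (List.lookup p.1 ovr).getD []) [] (PySem.Set.ofList [])
    rw [List.nil_append] at hfold
    have hMv : pvM ovr p = pvNorm (PySem.Set.ofList []) (p.2 ++ (List.lookup p.1 ovr).getD []) := by
      rw [pvM, ← List.map_append, List.foldl_map]
      exact hfold
    simp only [Function.comp_apply, hlk, Option.getD_some, hMv]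
  · -- override-only part
    rw [List.filter_map, List.map_map]
    have hfil : ovr.filter ((fun k => !((defaults.map Prod.fst).contains k)) ∘ Prod.fst)
        = ovr.filter (fun p =>
            !((defaults.foldl (fun res q => res.insert q.1 (pvM ovr q)) PySem.Dict.empty).contains p.1)) := by
      apply List.filter_congr
      intro q _
      simp [hcont q.1]
    rw [← hfil]
    apply List.map_congr_left
    intro p hp
    have hnotin : p.1 ∉ defaults.map Prod.fst := by
      have hpred := List.of_mem_filter hp
      simpa using hpred
    have hlkd : List.lookup p.1 defaults = none := pv_lookup_of_not_mem defaults hnotin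
    have hlko : List.lookup p.1 ovr = some p.2 :=
      pv_lookup_of_mem ovr ho (List.mem_of_mem_filter hp)
    have hfold := pv_foldA_eq_pvNorm p.2 [] (PySem.Set.ofList [])
    rw [List.nil_append] at hfold
    simp only [Function.comp_apply, hlkd, Option.getD_none, List.nil_append, hlko,
      Option.getD_some, pvN, hfold]

-- ===== VERDICT (by name: the statement is the Claim_ definition above) =====
theorem merge_aliases_py_spec : Claim_equal_merge_aliases_py := by
  intro defaults overrides _ hPre
  obtain ⟨hd, ho⟩ := hPre
  unfold Spec_merge_aliases_py
  have hA : merge_aliases_py defaults overrides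
      = ((overrides.getD []).foldl
          (fun res p => if res.contains p.1 then res else res.insert p.1 (pvN p))
          (defaults.foldl (fun res p => res.insert p.1 (pvM (overrides.getD []) p))
            PySem.Dict.empty)).items := rfl
  have hB : merge_aliases_py_alt defaults overrides
      = (defaults.map Prod.fst
          ++ ((overrides.getD []).map Prod.fst).filter
              (fun k => !((defaults.map Prod.fst).contains k))).map
          (fun k => (k, pvNorm (PySem.Set.ofList [])
            ((List.lookup k defaults).getD [] ++ (List.lookup k (overrides.getD [])).getD []))) := rfl
  rw [hA, hB]
  exact pv_main defaults (overrides.getD []) hd ho
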